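-- pv_equiv track=rewrite | github.com/dudamarlena/pyc_source | pycfiles/odfpy-1.4.1-py2.7/opendocument.py | __fixXmlPart
-- ===== SOURCE A (Python) =====
-- def __fixXmlPart(xmlpart):
--     """
--     fixes an xml code when it does not contain a set of requested
--     "xmlns:whatever" declarations.
--     added by G.K. on 2014/10/21
--     @param xmlpart unicode string: some XML code
--     @return fixed XML code
--     """
--     result = xmlpart
--     requestedPrefixes = ('meta', 'config', 'dc', 'style', 'svg', 'fo', 'draw', 'table',
--                          'form')
--     for prefix in requestedPrefixes:
--         if (' xmlns:{prefix}').format(prefix=prefix) not in xmlpart: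
--             try:
--                 pos = result.index(' xmlns:')
--                 toInsert = (' xmlns:{prefix}="urn:oasis:names:tc:opendocument:xmlns:{prefix}:1.0"').format(prefix=prefix)
--                 result = result[:pos] + toInsert + result[pos:]
--             except:
--                 pass
--
--     return result
-- ===== SOURCE B (Python) =====
-- def __fixXmlPart(xmlpart):
--     """Single-splice rewrite: collect missing prefixes once, insert one combined
--     declaration string at the first ' xmlns:' occurrence."""
--     prefixes = ('meta', 'config', 'dc', 'style', 'svg', 'fo', 'draw', 'table', 'form')
--     missing = [p for p in prefixes if (' xmlns:%s' % p) not in xmlpart]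
--     i = xmlpart.find(' xmlns:')
--     if i < 0:
--         return xmlpart
--     ins = ''.join(' xmlns:%s="urn:oasis:names:tc:opendocument:xmlns:%s:1.0"' % (p, p)
--                   for p in reversed(missing))
--     return xmlpart[:i] + ins + xmlpart[i:]
-- ===== Notes on version B (the rewrite author's own statement) =====
-- stated objective: simpler
-- what changed: A repeatedly re-searches the result and splices each missing declaration in separately; B collects the missing prefixes in one pass, finds ' xmlns:' once in the original string, and splices the single concatenated declaration block (built in reverse collection order) in one slice operation.
import Mathlib
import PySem

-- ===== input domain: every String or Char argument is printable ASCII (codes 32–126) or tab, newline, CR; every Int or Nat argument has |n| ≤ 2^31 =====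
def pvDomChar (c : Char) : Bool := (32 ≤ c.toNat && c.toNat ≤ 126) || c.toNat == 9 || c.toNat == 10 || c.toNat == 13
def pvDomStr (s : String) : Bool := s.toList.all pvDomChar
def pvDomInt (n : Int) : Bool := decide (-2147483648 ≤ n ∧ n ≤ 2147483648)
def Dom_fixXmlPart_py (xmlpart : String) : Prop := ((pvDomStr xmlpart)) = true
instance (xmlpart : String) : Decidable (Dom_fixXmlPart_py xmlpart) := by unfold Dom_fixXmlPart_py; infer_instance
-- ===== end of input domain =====

-- B replaces A's repeated index-and-splice loop by one pass collecting the missing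
-- prefixes and a single splice of the combined declaration string (objective: simpler).

-- ===== PORT A =====
-- shared literals: the search pattern ' xmlns:', the fixed prefix tuple, and the
-- declaration string built for a prefix
def pvPat : List Char := [' ', 'x', 'm', 'l', 'n', 's', ':']

def pvPrefixes : List (List Char) :=
  ["meta".toList, "config".toList, "dc".toList, "style".toList, "svg".toList,
   "fo".toList, "draw".toList, "table".toList, "form".toList]

def pvDecl (q : List Char) : List Char :=
  pvPat ++ q ++ "=\"urn:oasis:names:tc:opendocument:xmlns:".toList ++ q ++ ":1.0\"".toList

-- one iteration of A's for-loop (the try/except around .index is the 'find = -1' branch)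
def pvStepA (xml result q : List Char) : List Char :=
  if PySem.Chars.isIn (pvPat ++ q) xml then result
  else
    let pos := PySem.Chars.find result pvPat
    if pos = -1 then result
    else PySem.List.slice result none (some pos) ++ pvDecl q ++ PySem.List.slice result (some pos) none

def fixXmlPart_py (xmlpart : String) : String :=
  String.mk (pvPrefixes.foldl (pvStepA xmlpart.toList) xmlpart.toList)

-- ===== PORT B =====
def pvCharsB (xml : List Char) : List Char :=
  let missing := pvPrefixes.filter (fun q => !PySem.Chars.isIn (pvPat ++ q) xml)
  let i := PySem.Chars.find xml pvPat
  if i < 0 then xml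
  else
    PySem.List.slice xml none (some i) ++ PySem.Chars.join [] (missing.reverse.map pvDecl)
      ++ PySem.List.slice xml (some i) none

def fixXmlPart_py_alt (xmlpart : String) : String := String.mk (pvCharsB xmlpart.toList)

-- ===== PRECONDITION & SPEC =====
def Spec_fixXmlPart_py (xmlpart : String) (out : String) : Prop := out = fixXmlPart_py_alt xmlpart
instance (xmlpart : String) (out : String) : Decidable (Spec_fixXmlPart_py xmlpart out) := by unfold Spec_fixXmlPart_py; infer_instance

-- ===== CLAIM (what is proved, stated in full; the proofs are below) =====
def Claim_equal_fixXmlPart_py : Prop := ∀ (xmlpart : String), Dom_fixXmlPart_py xmlpart → Spec_fixXmlPart_py xmlpart (fixXmlPart_py xmlpart)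

-- ===== LEMMAS AND PROOFS =====

lemma pvPat_prefix_decl (q : List Char) : pvPat <+: pvDecl q := by
  unfold pvDecl; exact List.prefix_append _ _

-- the first occurrence of ' xmlns:' survives splicing a pat-headed block at its position
lemma pvFind_splice (xml acc : List Char) (p : Nat)
    (hfind : PySem.Chars.find xml pvPat = (p : Int)) (hacc : pvPat <+: acc) :
    PySem.Chars.find (xml.take p ++ (acc ++ xml.drop p)) pvPat = (p : Int) := by
  have hple : p ≤ xml.length := by
    have h1 := PySem.Chars.find_le_length xml pvPat
    rw [hfind] at h1; exact_mod_cast h1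
  have hlen : (xml.take p).length = p := by simp [List.length_take]; omega
  have hge : (0 : Int) ≤ PySem.Chars.find xml pvPat := by rw [hfind]; positivity
  have hxmlspec := PySem.Chars.find_spec hge
  rw [hfind, Int.toNat_natCast] at hxmlspec
  have hdrop : (xml.take p ++ (acc ++ xml.drop p)).drop p = acc ++ xml.drop p := by
    have h := List.drop_left (l₁ := xml.take p) (l₂ := acc ++ xml.drop p)
    rwa [hlen] at h
  have hA : pvPat <+: (xml.take p ++ (acc ++ xml.drop p)).drop p := by
    rw [hdrop]; exact List.prefix_append_of_prefix hacc
  have hB : ∀ i, i < p → ¬ pvPat <+: (xml.take p ++ (acc ++ xml.drop p)).drop i := by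
    intro i hi h
    have hsd : (xml.take p ++ (acc ++ xml.drop p)).drop i
        = (xml.take p).drop i ++ (acc ++ xml.drop p) :=
      List.drop_append_of_le_length (by omega)
    have htlen : ((xml.take p).drop i).length = p - i := by simp [List.length_drop, hlen]
    by_cases h7 : 7 ≤ p - i
    · have hpt : pvPat <+: (xml.take p).drop i := by
        refine (List.isPrefix_append_of_length ?_).mp (hsd ▸ h)
        simp [pvPat]; omega
      have hxd : pvPat <+: xml.drop i := by
        have ht2 : (xml.take p).drop i = (xml.drop i).take (p - i) := List.drop_take
        exact hpt.trans (ht2 ▸ List.take_prefix _ _)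
      exact hxmlspec.2 i hi hxd
    · obtain ⟨r, hr⟩ := h
      obtain ⟨r2, hr2⟩ := hacc
      have heq : (pvPat ++ r)[p - i]? = ((xml.take p).drop i ++ ((pvPat ++ r2) ++ xml.drop p))[p - i]? := by
        rw [hr, hsd, hr2]
      rw [List.getElem?_append_right (by omega : ((xml.take p).drop i).length ≤ p - i)] at heq
      rw [htlen, Nat.sub_self] at heq
      rw [List.getElem?_append_left (by simp [pvPat] : 0 < (pvPat ++ r2).length)] at heq
      rw [List.getElem?_append_left (by simp [pvPat] : 0 < pvPat.length)] at heq
      rw [List.getElem?_append_left (by simp [pvPat]; omega : p - i < pvPat.length)] at heq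
      have hj1 : 0 < p - i := by omega
      set j := p - i with hj
      interval_cases j <;> simp [pvPat] at heq
  have hin : PySem.Chars.isIn pvPat (xml.take p ++ (acc ++ xml.drop p)) = true :=
    (PySem.Chars.exists_prefix_drop_iff_isIn _ _).mp ⟨p, hA⟩
  have hnn : 0 ≤ PySem.Chars.find (xml.take p ++ (acc ++ xml.drop p)) pvPat :=
    (PySem.Chars.find_nonneg_iff _ _).mpr ((PySem.Chars.isIn_iff_infix _ _).mp hin)
  have hs := PySem.Chars.find_spec hnn
  have h1 : ¬ (PySem.Chars.find (xml.take p ++ (acc ++ xml.drop p)) pvPat).toNat < p :=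
    fun hlt => hB _ hlt hs.1
  have h2 : ¬ p < (PySem.Chars.find (xml.take p ++ (acc ++ xml.drop p)) pvPat).toNat :=
    fun hlt => hs.2 p hlt hA
  omega

-- loop invariant: A's fold prepends each missing prefix's declaration at position p
lemma pvLoopA (xml : List Char) (p : Nat)
    (hfind : PySem.Chars.find xml pvPat = (p : Int)) :
    ∀ (ps : List (List Char)) (acc : List Char), (acc = [] ∨ pvPat <+: acc) →
      ps.foldl (pvStepA xml) (xml.take p ++ (acc ++ xml.drop p)) =
        xml.take p ++
          (((ps.filter (fun q => !PySem.Chars.isIn (pvPat ++ q) xml)).reverse.map pvDecl).flatten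
            ++ (acc ++ xml.drop p)) := by
  have hple : p ≤ xml.length := by
    have h1 := PySem.Chars.find_le_length xml pvPat
    rw [hfind] at h1; exact_mod_cast h1
  have hlen : (xml.take p).length = p := by simp [List.length_take]; omega
  intro ps
  induction ps with
  | nil => intro acc _; simp
  | cons q ps ih =>
    intro acc hacc
    by_cases hin : PySem.Chars.isIn (pvPat ++ q) xml = true
    · have hstep : pvStepA xml (xml.take p ++ (acc ++ xml.drop p)) q
          = xml.take p ++ (acc ++ xml.drop p) := by simp [pvStepA, hin]
      simp only [List.foldl_cons, hstep]
      rw [ih acc hacc]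
      simp [hin]
    · have hfres : PySem.Chars.find (xml.take p ++ (acc ++ xml.drop p)) pvPat = (p : Int) := by
        rcases hacc with rfl | hpre
        · simpa [List.take_append_drop] using hfind
        · exact pvFind_splice xml acc p hfind hpre
      have htake : (xml.take p ++ (acc ++ xml.drop p)).take p = xml.take p := by
        rw [List.take_append_of_le_length (le_of_eq hlen.symm), List.take_of_length_le (le_of_eq hlen)]
      have hdrop : (xml.take p ++ (acc ++ xml.drop p)).drop p = acc ++ xml.drop p := by
        have h := List.drop_left (l₁ := xml.take p) (l₂ := acc ++ xml.drop p)
        rwa [hlen] at h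
      have hstep : pvStepA xml (xml.take p ++ (acc ++ xml.drop p)) q
          = xml.take p ++ ((pvDecl q ++ acc) ++ xml.drop p) := by
        have hne : ¬ ((p : Int) = -1) := by omega
        simp only [pvStepA, hin, if_false, hfres, hne, Bool.false_eq_true]
        simp [pysem, htake, hdrop]
      simp only [List.foldl_cons, hstep]
      rw [ih (pvDecl q ++ acc) (Or.inr (List.prefix_append_of_prefix (pvPat_prefix_decl q)))]
      simp [hin, List.flatten_append]

lemma pvIntercalate_nil {α : Type} (xss : List (List α)) :
    List.intercalate [] xss = xss.flatten := by
  induction xss with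
  | nil => rfl
  | cons x xs ih =>
    cases xs <;> simp_all [List.intercalate, List.intersperse]

lemma pvLoopA_none (xml : List Char) (h : PySem.Chars.find xml pvPat = -1) :
    ∀ (ps : List (List Char)), ps.foldl (pvStepA xml) xml = xml := by
  intro ps
  induction ps with
  | nil => rfl
  | cons q ps ih =>
    have hstep : pvStepA xml xml q = xml := by simp [pvStepA, h]
    simp [List.foldl, hstep, ih]

-- ===== VERDICT (by name: the statement is the Claim_ definition above) =====
theorem fixXmlPart_py_spec : Claim_equal_fixXmlPart_py := by
  intro s _
  unfold Spec_fixXmlPart_py fixXmlPart_py fixXmlPart_py_alt pvCharsB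
  set xml := s.toList with hx
  by_cases h1 : PySem.Chars.find xml pvPat = -1
  · simp [pvLoopA_none xml h1, h1]
  · have hge : 0 ≤ PySem.Chars.find xml pvPat := by
      have := PySem.Chars.neg_one_le_find xml pvPat; omega
    set p := (PySem.Chars.find xml pvPat).toNat with hp
    have hfind : PySem.Chars.find xml pvPat = (p : Int) := by
      rw [hp, Int.toNat_of_nonneg hge]
    have hstart : xml = xml.take p ++ ([] ++ xml.drop p) := by
      simp [List.take_append_drop]
    have := pvLoopA xml p hfind pvPrefixes [] (Or.inl rfl)
    rw [← hstart] at this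
    rw [this, hfind]
    have hnot : ¬ ((p : Int) < 0) := by omega
    simp [hnot, pysem, PySem.Chars.join, pvIntercalate_nil, List.map_reverse]
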